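-- pv_equiv track=rewrite | github.com/Anwesh2/SimilarImagesIdentificationSystem | CSE-515-P3-master/p3_tasks/task5.py | get_bits_for_dimens
-- ===== SOURCE A (Python) =====
-- import math
--
-- def get_bits_for_dimens(b, d):
--     bj = []
--     for j in range(d):
--         if j+1 <= b % d:
--             bj.append(math.floor(b/d) + 1)
--         else:
--             bj.append(math.floor(b/d))
--     return bj
-- ===== SOURCE B (Python) =====
-- def get_bits_for_dimens(b, d):
--     # Greedy sequential allocation: each dimension takes the ceiling of the
--     # remaining bits over the remaining dimensions; no modulus, no per-index branch.
--     bits = []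
--     rem = b
--     k = d
--     while k > 0:
--         x = -(-rem // k)  # ceil(rem / k)
--         bits.append(x)
--         rem -= x
--         k -= 1
--     return bits
-- ===== Notes on version B (the rewrite author's own statement) =====
-- stated objective: alternative
-- what changed: B is a greedy sequential allocator: it keeps a running remainder and gives each next dimension the ceiling of remaining/remaining-dimensions, instead of A's per-index comparison of j+1 against b % d with a precomputed floor quotient.
import Mathlib
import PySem

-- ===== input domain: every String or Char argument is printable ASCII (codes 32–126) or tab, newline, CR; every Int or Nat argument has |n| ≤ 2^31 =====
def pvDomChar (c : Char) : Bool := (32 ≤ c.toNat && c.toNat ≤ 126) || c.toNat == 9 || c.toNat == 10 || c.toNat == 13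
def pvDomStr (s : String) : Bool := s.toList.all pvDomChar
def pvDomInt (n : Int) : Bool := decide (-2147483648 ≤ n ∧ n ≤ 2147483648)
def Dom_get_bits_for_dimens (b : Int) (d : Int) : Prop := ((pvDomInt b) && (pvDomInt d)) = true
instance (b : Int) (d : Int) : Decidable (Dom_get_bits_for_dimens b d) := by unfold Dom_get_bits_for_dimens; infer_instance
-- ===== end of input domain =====

-- B replaces A's per-index branch on b % d by a greedy loop that gives each next
-- dimension the ceiling of the remaining bits over the remaining dimensions (alternative decomposition).


-- ===== PORT A =====
-- loop 'for j in range(d)' appending math.floor(b/d)+1 or math.floor(b/d);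
-- math.floor(b/d) equals b // d (PySem.Int.floordiv) exactly for |b|,|d| ≤ 2^31 (the float
-- quotient cannot round across an integer there), which Dom guarantees.
def get_bits_for_dimens (b : Int) (d : Int) : List Int :=
  (PySem.List.pyRange 0 d 1).foldl
    (fun bj j =>
      if j + 1 ≤ PySem.Int.mod b d then bj ++ [PySem.Int.floordiv b d + 1]
      else bj ++ [PySem.Int.floordiv b d]) []

-- ===== PORT B =====
-- while k > 0: x = -(-rem // k); bits.append(x); rem -= x; k -= 1
-- The loop counts k down from d to 0, so it runs d.toNat times.
def bitsLoop (bits : List Int) (rem : Int) (k : Nat) : List Int :=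
  match k with
  | 0 => bits
  | Nat.succ k' =>
    let x := -(PySem.Int.floordiv (-rem) ((k' + 1 : Nat) : Int))
    bitsLoop (bits ++ [x]) (rem - x) k'

def get_bits_for_dimens_alt (b : Int) (d : Int) : List Int :=
  bitsLoop [] b d.toNat

-- ===== PRECONDITION & SPEC =====
def Spec_get_bits_for_dimens (b : Int) (d : Int) (out : List Int) : Prop := out = get_bits_for_dimens_alt b d
instance (b : Int) (d : Int) (out : List Int) : Decidable (Spec_get_bits_for_dimens b d out) := by unfold Spec_get_bits_for_dimens; infer_instance

-- ===== CLAIM (what is proved, stated in full; the proofs are below) =====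
def Claim_equal_get_bits_for_dimens : Prop := ∀ (b : Int) (d : Int), Dom_get_bits_for_dimens b d → Spec_get_bits_for_dimens b d (get_bits_for_dimens b d)

-- ===== LEMMAS AND PROOFS =====

-- uniqueness of Python floor division / modulus for a positive divisor
lemma floordiv_mod_unique (a n q r : Int) (hn : 0 < n) (h : a = q * n + r)
    (h0 : 0 ≤ r) (h1 : r < n) :
    PySem.Int.floordiv a n = q ∧ PySem.Int.mod a n = r := by
  have hq : PySem.Int.floordiv a n = q := by
    rw [PySem.Int.floordiv_eq_iff_of_pos hn]
    constructor <;> nlinarith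
  refine ⟨hq, ?_⟩
  have := PySem.Int.floordiv_mul_add_mod a n
  rw [hq] at this
  linarith

-- the ceiling share -(-a // n) in terms of the floor quotient and remainder
lemma ceil_share (a n q r : Int) (hn : 0 < n) (h : a = q * n + r)
    (h0 : 0 ≤ r) (h1 : r < n) :
    -(PySem.Int.floordiv (-a) n) = if r = 0 then q else q + 1 := by
  by_cases hr : r = 0
  · have : PySem.Int.floordiv (-a) n = -q :=
      (floordiv_mod_unique (-a) n (-q) 0 hn (by rw [h, hr]; ring) le_rfl hn).1
    simp [hr, this]
  · have : PySem.Int.floordiv (-a) n = -q - 1 :=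
      (floordiv_mod_unique (-a) n (-q - 1) (n - r) hn (by rw [h]; ring)
        (by omega) (by omega)).1
    simp [hr, this]; ring

-- the greedy loop produces the two uniform blocks
lemma bitsLoop_eq (k : Nat) : ∀ (bits : List Int) (q r : Int), 0 ≤ r → r < (k : Int) →
    bitsLoop bits (q * (k : Int) + r) k
      = bits ++ List.replicate r.toNat (q + 1) ++ List.replicate (k - r.toNat) q := by
  induction k with
  | zero => intro bits q r h0 h1; omega
  | succ k' ih =>
    intro bits q r h0 h1
    have hn : (0 : Int) < ((k' + 1 : Nat) : Int) := by positivity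
    have hx : -(PySem.Int.floordiv (-(q * ((k' + 1 : Nat) : Int) + r)) ((k' + 1 : Nat) : Int))
        = if r = 0 then q else q + 1 :=
      ceil_share _ _ q r hn rfl h0 (by push_cast at h1 ⊢; omega)
    by_cases hr : r = 0
    · have hx0 : -(PySem.Int.floordiv (-(q * ((k' + 1 : Nat) : Int) + r)) ((k' + 1 : Nat) : Int)) = q := by
        rw [hx]; simp [hr]
      have hrem : q * ((k' + 1 : Nat) : Int) + r - q = q * ((k' : Nat) : Int) + 0 := by
        subst hr; push_cast; ring
      rw [bitsLoop]
      simp only [hx0, hrem]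
      subst hr
      cases k' with
      | zero => simp [bitsLoop]
      | succ m =>
        rw [ih (bits ++ [q]) q 0 le_rfl (by positivity)]
        simp [List.replicate_succ, List.append_assoc]
    · have hx1 : -(PySem.Int.floordiv (-(q * ((k' + 1 : Nat) : Int) + r)) ((k' + 1 : Nat) : Int)) = q + 1 := by
        rw [hx]; simp [hr]
      have hk' : 0 < k' := by push_cast at h1; omega
      have hrem : q * ((k' + 1 : Nat) : Int) + r - (q + 1) = q * ((k' : Nat) : Int) + (r - 1) := by
        push_cast; ring
      rw [bitsLoop]
      simp only [hx1, hrem]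
      rw [ih (bits ++ [q + 1]) q (r - 1) (by omega) (by push_cast at h1 ⊢; omega)]
      have h3 : k' - (r - 1).toNat = k' + 1 - r.toNat := by omega
      have h2 : r.toNat = (r - 1).toNat + 1 := by omega
      rw [h3, h2]
      simp [List.replicate_succ, List.append_assoc]

-- A's map over 0..n-1 of a threshold branch is the same two replicate blocks
lemma map_range_threshold (q r : Int) (n : Nat) (hr0 : 0 ≤ r) (hrn : r ≤ (n : Int)) :
    (List.range n).map (fun k : Nat => if (k : Int) + 1 ≤ r then q + 1 else q)
      = List.replicate r.toNat (q + 1) ++ List.replicate (n - r.toNat) q := by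
  induction n with
  | zero => simp; omega
  | succ m ih =>
    by_cases h : (m : Int) + 1 ≤ r
    · have hall : ∀ k ∈ List.range (m+1),
          (fun k : Nat => if (k : Int) + 1 ≤ r then q + 1 else q) k = q + 1 := by
        intro k hk; simp at hk
        have : (k : Int) + 1 ≤ r := by omega
        simp [this]
      rw [List.map_congr_left hall, List.map_const']
      have hr : r.toNat = m + 1 := by omega
      simp [hr]
    · have ihh := ih (by omega)
      rw [List.range_succ, List.map_append, ihh]
      have h2 : m + 1 - r.toNat = (m - r.toNat) + 1 := by omega
      simp [h2, List.replicate_succ' (n := m - r.toNat), List.append_assoc]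
      omega

-- ===== VERDICT (by name: the statement is the Claim_ definition above) =====
theorem get_bits_for_dimens_spec : Claim_equal_get_bits_for_dimens := by
  intro b d _
  unfold Spec_get_bits_for_dimens get_bits_for_dimens get_bits_for_dimens_alt
  by_cases hd : d ≤ 0
  · have h0 : d.toNat = 0 := by omega
    simp [PySem.List.pyRange_one_eq_nil hd, h0, bitsLoop]
  · push Not at hd
    have hmods := PySem.Int.mod_nonneg hd (a := b)
    have hmodlt := PySem.Int.mod_lt hd (a := b)
    have hcast : ((d.toNat : Nat) : Int) = d := by omega
    -- B side
    have hb : b = PySem.Int.floordiv b d * ((d.toNat : Nat) : Int) + PySem.Int.mod b d := by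
      rw [hcast]; linarith [PySem.Int.floordiv_mul_add_mod b d]
    rw [show bitsLoop [] b d.toNat
          = bitsLoop [] (PySem.Int.floordiv b d * ((d.toNat : Nat) : Int) + PySem.Int.mod b d) d.toNat
        from by rw [← hb]]
    rw [bitsLoop_eq d.toNat [] (PySem.Int.floordiv b d) (PySem.Int.mod b d) hmods (by omega)]
    -- A side
    rw [show (fun (bj : List Int) (j : Int) =>
          if j + 1 ≤ PySem.Int.mod b d then bj ++ [PySem.Int.floordiv b d + 1]
          else bj ++ [PySem.Int.floordiv b d])
        = (fun bj j => bj ++ [if j + 1 ≤ PySem.Int.mod b d then PySem.Int.floordiv b d + 1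
            else PySem.Int.floordiv b d]) from by
      funext bj j; split_ifs <;> rfl]
    rw [PySem.List.foldl_append_singleton_eq_map, PySem.List.pyRange_one, List.map_map]
    simp only [List.nil_append, Function.comp_def, zero_add, sub_zero]
    exact map_range_threshold (PySem.Int.floordiv b d) (PySem.Int.mod b d) d.toNat
      hmods (by omega)
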